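-- pv_equiv track=rewrite | github.com/hujingbin1/NLP-homework | test01/clean.py | clean_index
-- ===== SOURCE A (Python) =====
-- def clean_index(string):
--     # 1. 2.
--     new_string = ""
--     idx = 0
--     while idx < len(string):
--         ch = string[idx]
--         if "0" <= ch <= "9" and idx < len(string) - 1 and string[idx + 1] == ".":
--             new_string += " "
--             idx += 1
--         else:
--             new_string += ch
--         idx += 1
--     return new_string
-- ===== SOURCE B (Python) =====
-- import re
--
-- def clean_index(string):
--     return re.sub(r'[0-9]\.', ' ', string)
-- ===== Notes on version B (the rewrite author's own statement) =====
-- stated objective: idiomatic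
-- what changed: Replaced the manual index-based scan that builds the result by repeated string concatenation with a single non-overlapping regex substitution replacing each digit-dot pair by one space.
import Mathlib
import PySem

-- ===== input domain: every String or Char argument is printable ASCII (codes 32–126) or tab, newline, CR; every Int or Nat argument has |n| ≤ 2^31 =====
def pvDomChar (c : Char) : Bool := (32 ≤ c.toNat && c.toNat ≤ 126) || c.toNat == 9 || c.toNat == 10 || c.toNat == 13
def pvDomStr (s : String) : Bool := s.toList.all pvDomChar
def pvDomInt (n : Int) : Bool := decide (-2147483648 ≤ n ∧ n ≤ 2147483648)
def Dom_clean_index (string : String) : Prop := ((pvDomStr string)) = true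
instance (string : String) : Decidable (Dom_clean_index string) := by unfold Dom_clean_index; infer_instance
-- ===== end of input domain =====

-- B replaces A's manual index scan with one regex substitution re.sub(r'[0-9]\.', ' ', s) (idiomatic).

-- ===== PORT A =====
-- A's while loop over idx, transcribed as recursion on idx with the accumulated output string.
def clean_index_loop (cs : List Char) (idx : Nat) (acc : List Char) : List Char :=
  if h : idx < cs.length then
    let ch := cs[idx]
    if ('0' ≤ ch ∧ ch ≤ '9') ∧ idx < cs.length - 1 ∧ cs[idx + 1]? = some '.' then
      clean_index_loop cs (idx + 2) (acc ++ [' '])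
    else
      clean_index_loop cs (idx + 1) (acc ++ [ch])
  else acc
termination_by cs.length - idx

def clean_index (string : String) : String :=
  String.ofList (clean_index_loop string.toList 0 [])

-- ===== PORT B =====
-- re.sub with the fixed two-character pattern [0-9]\. : leftmost non-overlapping matches,
-- transcribed exactly as head-pattern recursion (match consumes both chars, emits one space).
def cleanB : List Char → List Char
  | [] => []
  | [c] => [c]
  | c :: d :: rest =>
    if ('0' ≤ c ∧ c ≤ '9') ∧ d = '.' then ' ' :: cleanB rest
    else c :: cleanB (d :: rest)

def clean_index_alt (string : String) : String :=
  String.ofList (cleanB string.toList)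

-- ===== PRECONDITION & SPEC =====
def Spec_clean_index (string : String) (out : String) : Prop := out = clean_index_alt string
instance (string : String) (out : String) : Decidable (Spec_clean_index string out) := by unfold Spec_clean_index; infer_instance

-- ===== CLAIM (what is proved, stated in full; the proofs are below) =====
def Claim_equal_clean_index : Prop := ∀ (string : String), Dom_clean_index string → Spec_clean_index string (clean_index string)

-- ===== LEMMAS AND PROOFS =====

theorem clean_index_loop_eq (cs : List Char) (idx : Nat) (acc : List Char) :
    clean_index_loop cs idx acc = acc ++ cleanB (cs.drop idx) := by
  induction hn : cs.length - idx using Nat.strong_induction_on generalizing idx acc with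
  | _ n ih =>
    unfold clean_index_loop
    by_cases h : idx < cs.length
    · simp only [h, dif_pos]
      have hdrop : cs.drop idx = cs[idx] :: cs.drop (idx + 1) :=
        List.drop_eq_getElem_cons h
      by_cases hc : ('0' ≤ cs[idx] ∧ cs[idx] ≤ '9') ∧ idx < cs.length - 1 ∧ cs[idx + 1]? = some '.'
      · simp only [hc]
        have h1 : idx + 1 < cs.length := by omega
        have hdrop1 : cs.drop (idx + 1) = cs[idx + 1] :: cs.drop (idx + 2) :=
          List.drop_eq_getElem_cons h1
        have hdot : cs[idx + 1] = '.' := by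
          have := hc.2.2
          rw [List.getElem?_eq_getElem h1] at this
          exact Option.some.inj this
        rw [ih (cs.length - (idx + 2)) (by omega) (idx + 2) (acc ++ [' ']) rfl, hdrop, hdrop1, hdot]
        simp [cleanB, hc.1]
      · simp only [hc]
        rw [ih (cs.length - (idx + 1)) (by omega) (idx + 1) (acc ++ [cs[idx]]) rfl, hdrop]
        rcases Nat.lt_or_ge (idx + 1) cs.length with h1 | h1
        · have hdrop1 : cs.drop (idx + 1) = cs[idx + 1] :: cs.drop (idx + 2) :=
            List.drop_eq_getElem_cons h1
          rw [hdrop1]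
          have hcond : ¬ (('0' ≤ cs[idx] ∧ cs[idx] ≤ '9') ∧ cs[idx + 1] = '.') := by
            intro ⟨ha, hb⟩
            exact hc ⟨ha, by omega, by rw [List.getElem?_eq_getElem h1, hb]⟩
          simp [cleanB, hcond]
        · have : cs.drop (idx + 1) = [] := List.drop_eq_nil_of_le h1
          rw [this]
          simp [cleanB]
    · simp only [h, dif_neg, not_false_iff]
      have : cs.drop idx = [] := List.drop_eq_nil_of_le (by omega)
      rw [this]
      simp [cleanB]

-- ===== VERDICT (by name: the statement is the Claim_ definition above) =====
theorem clean_index_spec : Claim_equal_clean_index := by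
  intro s _
  unfold Spec_clean_index clean_index clean_index_alt
  rw [clean_index_loop_eq]
  simp
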